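-- pv_equiv track=rewrite | github.com/Almazishe/algorithms | yandex-practicum/Ловкость рук/main.py | solution
-- ===== SOURCE A (Python) =====
-- def count_values(matrix):
--     counts = {}
--     for i in range(4):
--         for j in range(4):
--             n = matrix[i][j]
--             if n in counts:
--                 counts[n] += 1
--             else:
--                 counts[n] = 1
--     return counts
--
-- def solution(k, matrix):
--     res = 0
--     counts = count_values(matrix)
--
--     for t in range(1, 10):
--         if str(t) not in counts:
--             continue
--
--         if counts[str(t)] <= k * 2:
--             res += 1
--
--     return res
-- ===== SOURCE B (Python) =====
-- def solution(k, matrix):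
--     # Sort the 16 cells so equal values sit in contiguous runs, then scan runs:
--     # each run of a digit "1".."9" whose length is <= 2k counts once.
--     cells = sorted(matrix[i][j] for i in range(4) for j in range(4))
--     res = 0
--     i = 0
--     while i < len(cells):
--         j = i
--         while j < len(cells) and cells[j] == cells[i]:
--             j += 1
--         if cells[i] in ("1", "2", "3", "4", "5", "6", "7", "8", "9") and j - i <= k * 2:
--             res += 1
--         i = j
--     return res
-- ===== Notes on version B (the rewrite author's own statement) =====
-- stated objective: alternative
-- what changed: Replaces the build-a-counts-dict-then-query-digits approach with sort-then-scan: the 16 cells are sorted once so equal values form contiguous runs, and a single run-scan counts each digit run of length <= 2k; absent digits have no run, reproducing A's skip of zero-count digits.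
import Mathlib
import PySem

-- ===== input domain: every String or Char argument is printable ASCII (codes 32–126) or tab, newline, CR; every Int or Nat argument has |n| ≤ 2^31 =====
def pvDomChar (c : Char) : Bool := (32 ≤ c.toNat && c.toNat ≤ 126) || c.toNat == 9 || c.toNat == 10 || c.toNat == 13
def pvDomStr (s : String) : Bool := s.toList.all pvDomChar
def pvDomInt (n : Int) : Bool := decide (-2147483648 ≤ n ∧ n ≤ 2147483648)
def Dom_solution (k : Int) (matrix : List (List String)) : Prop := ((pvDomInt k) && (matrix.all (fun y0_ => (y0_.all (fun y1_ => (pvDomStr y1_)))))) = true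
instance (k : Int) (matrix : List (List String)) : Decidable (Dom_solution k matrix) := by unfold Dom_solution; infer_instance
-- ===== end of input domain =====

-- B sorts the 16 cells once and scans contiguous runs instead of building a counts dict;
-- equivalence is about the return value only.

-- ===== PORT A =====
-- matrix[i][j] is pyGetD; Pre_solution guarantees the indices are in range, so the defaults are never used.
def count_values (matrix : List (List String)) : PySem.Dict String Int :=
  (PySem.List.pyRange 0 4 1).foldl (fun counts i =>
    (PySem.List.pyRange 0 4 1).foldl (fun counts j =>
      let n := PySem.List.pyGetD (PySem.List.pyGetD matrix i []) j ""
      if counts.contains n then counts.insert n (counts.getD n 0 + 1)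
      else counts.insert n 1) counts) PySem.Dict.empty

def solution (k : Int) (matrix : List (List String)) : Int :=
  let counts := count_values matrix
  (PySem.List.pyRange 1 10 1).foldl (fun res t =>
    if (counts.contains (PySem.Int.toStr t)) = false then res
    else if counts.getD (PySem.Int.toStr t) 0 ≤ k * 2 then res + 1 else res) 0

-- ===== PORT B =====
-- the literal tuple ("1", ..., "9") of Source B
def pvDigits : List String := ["1", "2", "3", "4", "5", "6", "7", "8", "9"]

-- the run scan of Source B's outer while loop: the inner while that advances j over the
-- run of cells equal to cells[i] is takeWhile/dropWhile on the sorted list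
def runScan (k : Int) : List String → Int
  | [] => 0
  | x :: xs =>
      (if x ∈ pvDigits ∧ ((xs.takeWhile (fun y => y == x)).length + 1 : Int) ≤ k * 2
       then 1 else 0) + runScan k (xs.dropWhile (fun y => y == x))
termination_by l => l.length
decreasing_by
  simpa using Nat.lt_succ_of_le (List.length_dropWhile_le _ _)

def solution_alt (k : Int) (matrix : List (List String)) : Int :=
  let cells := (PySem.List.pyRange 0 4 1).flatMap (fun i =>
    (PySem.List.pyRange 0 4 1).map (fun j =>
      PySem.List.pyGetD (PySem.List.pyGetD matrix i []) j ""))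
  runScan k (PySem.List.sorted cells (fun x => x) false)

-- ===== PRECONDITION & SPEC =====
-- Pre_: A indexes matrix[i][j] for i,j in range(4), so it raises IndexError unless the
-- matrix has at least 4 rows and each of the first 4 rows at least 4 entries.
def Pre_solution (k : Int) (matrix : List (List String)) : Prop :=
  4 ≤ matrix.length ∧ ∀ row ∈ matrix.take 4, 4 ≤ row.length
instance (k : Int) (matrix : List (List String)) : Decidable (Pre_solution k matrix) := by
  unfold Pre_solution; infer_instance
def pvWitness_solution : Int × List (List String) :=
  (1, [["1","2","3","4"],["5","6","7","8"],["9","1","2","3"],["4","5","6","7"]])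
def Spec_solution (k : Int) (matrix : List (List String)) (out : Int) : Prop := out = solution_alt k matrix
instance (k : Int) (matrix : List (List String)) (out : Int) : Decidable (Spec_solution k matrix out) := by unfold Spec_solution; infer_instance

-- ===== CLAIM (what is proved, stated in full; the proofs are below) =====
def Claim_equal_solution : Prop := ∀ (k : Int) (matrix : List (List String)), Dom_solution k matrix → Pre_solution k matrix → Spec_solution k matrix (solution k matrix)

-- ===== LEMMAS AND PROOFS =====

-- the per-digit indicator sum both programs compute, over an abstract digit list E
def digitSum (k : Int) (E : List String) (l : List String) : Int :=
  (E.map (fun s => if 0 < (l.count s : Int) ∧ (l.count s : Int) ≤ k * 2 then (1 : Int) else 0)).sum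

-- ---------- A-side: solution = digitSum over pvDigits ----------

theorem step_eq_modify (counts : PySem.Dict String Int) (n : String) :
    (if counts.contains n then counts.insert n (counts.getD n 0 + 1)
     else counts.insert n 1) = counts.modify n 0 (· + 1) := by
  unfold PySem.Dict.modify
  split_ifs with h
  · rfl
  · rw [PySem.Dict.getD_of_not_contains (h := by simpa using h)]
    norm_num

theorem foldl_foldl_flatMap {α β γ : Type} (l : List α) (f : α → List β)
    (g : γ → β → γ) (init : γ) :
    l.foldl (fun acc i => (f i).foldl g acc) init = (l.flatMap f).foldl g init := by
  induction l generalizing init with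
  | nil => rfl
  | cons x xs ih => simp [List.flatMap_cons, List.foldl_append, ih]

theorem count_values_eq (matrix : List (List String)) :
    count_values matrix = PySem.Dict.counter
      ((PySem.List.pyRange 0 4 1).flatMap (fun i =>
        (PySem.List.pyRange 0 4 1).map (fun j =>
          PySem.List.pyGetD (PySem.List.pyGetD matrix i []) j ""))) := by
  unfold count_values
  simp only [step_eq_modify]
  rw [PySem.Dict.counter_eq_foldl, ← foldl_foldl_flatMap]
  simp only [List.foldl_map]

theorem per_digit (k r : Int) (cells : List String) (s : String) :
    (if cells.contains s = false then r
     else if (cells.count s : Int) ≤ k * 2 then r + 1 else r)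
    = r + (if 0 < (cells.count s : Int) ∧ (cells.count s : Int) ≤ k * 2 then (1 : Int) else 0) := by
  by_cases h : s ∈ cells
  · have hc : 0 < cells.count s := List.count_pos_iff.mpr h
    simp only [List.contains_eq_mem, h, decide_true]
    split_ifs <;> simp_all
  · have hc : cells.count s = 0 := List.count_eq_zero.mpr h
    simp [List.contains_eq_mem, h, hc]

theorem solution_eq_digitSum (k : Int) (matrix : List (List String)) :
    solution k matrix = digitSum k pvDigits
      ((PySem.List.pyRange 0 4 1).flatMap (fun i =>
        (PySem.List.pyRange 0 4 1).map (fun j =>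
          PySem.List.pyGetD (PySem.List.pyGetD matrix i []) j ""))) := by
  unfold solution
  rw [count_values_eq]
  simp only [PySem.Dict.contains_counter, PySem.Dict.getD_counter]
  simp only [per_digit]
  rw [PySem.List.foldl_add, zero_add]
  have hmap : (PySem.List.pyRange 1 10 1).map PySem.Int.toStr = pvDigits := by decide
  unfold digitSum
  rw [← hmap, List.map_map]
  rfl

-- ---------- B-side: runScan on a sorted list = digitSum ----------

theorem digitSum_congr (k : Int) (E l l' : List String)
    (h : ∀ s ∈ E, l.count s = l'.count s) : digitSum k E l = digitSum k E l' := by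
  unfold digitSum
  congr 1
  exact List.map_congr_left (fun s hs => by rw [h s hs])

theorem digitSum_run (k : Int) (E : List String) (hnd : E.Nodup)
    (x : String) (l rest : List String)
    (hxl : (l.count x : Int) = c) (hxr : rest.count x = 0)
    (hoth : ∀ s, s ≠ x → l.count s = rest.count s) :
    digitSum k E l
      = (if x ∈ E ∧ 0 < c ∧ c ≤ k * 2 then (1 : Int) else 0) + digitSum k E rest := by
  induction E with
  | nil => simp [digitSum]
  | cons s E' ih =>
      rcases List.nodup_cons.mp hnd with ⟨hsE, hnd'⟩
      by_cases hsx : s = x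
      · subst hsx
        have hE' : digitSum k E' l = digitSum k E' rest :=
          digitSum_congr k E' l rest (fun t ht => hoth t (fun h => hsE (h ▸ ht)))
        simp only [digitSum, List.map_cons, List.sum_cons] at *
        rw [hE', hxl, hxr]
        simp only [List.mem_cons, true_or, true_and]
        split_ifs <;> omega
      · have hc : l.count s = rest.count s := hoth s hsx
        have := ih hnd'
        simp only [digitSum, List.map_cons, List.sum_cons] at *
        rw [hc, this]
        have hxs : x ≠ s := fun h => hsx h.symm
        have hmem : (x ∈ s :: E') ↔ (x ∈ E') := by
          simp [List.mem_cons, hxs]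
        simp only [hmem]
        split_ifs <;> omega

theorem not_mem_dropWhile_self (x : String) (xs : List String)
    (hle : ∀ y ∈ xs, x ≤ y) (hp : xs.Pairwise (· ≤ ·)) :
    x ∉ xs.dropWhile (fun y => y == x) := by
  induction xs with
  | nil => simp
  | cons y ys ih =>
      rcases List.pairwise_cons.mp hp with ⟨hy, hp'⟩
      by_cases hyx : y = x
      · rw [List.dropWhile_cons_of_pos (by simp [hyx])]
        exact ih (fun z hz => hle z (List.mem_cons_of_mem _ hz)) hp'
      · rw [List.dropWhile_cons_of_neg (by simp [hyx])]
        intro hmem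
        rcases List.mem_cons.mp hmem with h | h
        · exact hyx h.symm
        · have h1 : x ≤ y := hle y (List.mem_cons_self)
          have h2 : y ≤ x := hy x h
          exact hyx (le_antisymm h2 h1)

theorem count_head_run (x : String) (xs : List String)
    (hrest : x ∉ xs.dropWhile (fun y => y == x)) :
    (x :: xs).count x = (xs.takeWhile (fun y => y == x)).length + 1 := by
  have hsplit := List.takeWhile_append_dropWhile (p := fun y => y == x) (l := xs)
  have htake : (xs.takeWhile (fun y => y == x)).count x
      = (xs.takeWhile (fun y => y == x)).length := by
    apply List.count_eq_length.mpr
    intro y hy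
    have hyx : y = x := by simpa using List.mem_takeWhile_imp hy
    simp [hyx]
  have hdrop : (xs.dropWhile (fun y => y == x)).count x = 0 :=
    List.count_eq_zero.mpr hrest
  calc (x :: xs).count x = xs.count x + 1 := List.count_cons_self ..
    _ = ((xs.takeWhile (fun y => y == x)) ++ (xs.dropWhile (fun y => y == x))).count x + 1 := by
        rw [hsplit]
    _ = _ := by rw [List.count_append, htake, hdrop]

theorem count_other_run (x s : String) (hs : s ≠ x) (xs : List String) :
    (x :: xs).count s = (xs.dropWhile (fun y => y == x)).count s := by
  have hsplit := List.takeWhile_append_dropWhile (p := fun y => y == x) (l := xs)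
  have htake : (xs.takeWhile (fun y => y == x)).count s = 0 := by
    apply List.count_eq_zero.mpr
    intro hmem
    have := List.mem_takeWhile_imp hmem
    exact hs (by simpa using this)
  calc (x :: xs).count s = xs.count s := by have hxs : ¬ x = s := fun h => hs h.symm; simp [hxs]
    _ = ((xs.takeWhile (fun y => y == x)) ++ (xs.dropWhile (fun y => y == x))).count s := by
        rw [hsplit]
    _ = _ := by rw [List.count_append, htake, zero_add]

theorem runScan_eq_digitSum_aux (k : Int) (n : Nat) : ∀ (l : List String),
    l.length ≤ n → l.Pairwise (· ≤ ·) → runScan k l = digitSum k pvDigits l := by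
  induction n with
  | zero =>
    intro l hl _
    have : l = [] := List.eq_nil_of_length_eq_zero (Nat.le_zero.mp hl)
    subst this
    simp [runScan, digitSum, pvDigits]
  | succ n ih =>
    intro l hl hp
    match l, hl, hp with
    | [], _, _ => simp [runScan, digitSum, pvDigits]
    | x :: xs, hl, hp =>
      rcases List.pairwise_cons.mp hp with ⟨hle, hp'⟩
      have hrest_sub : (xs.dropWhile (fun y => y == x)).Sublist xs :=
        List.dropWhile_sublist _
      have hrest_p : (xs.dropWhile (fun y => y == x)).Pairwise (· ≤ ·) :=
        hp'.sublist hrest_sub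
      have hnot : x ∉ xs.dropWhile (fun y => y == x) :=
        not_mem_dropWhile_self x xs hle hp'
      have ihrest := ih (xs.dropWhile (fun y => y == x))
        (le_trans (List.length_dropWhile_le _ _) (Nat.le_of_succ_le_succ hl)) hrest_p
      rw [runScan, ihrest]
      rw [digitSum_run k pvDigits (by decide) x (x :: xs) (xs.dropWhile (fun y => y == x))
        (c := ((xs.takeWhile (fun y => y == x)).length + 1 : Int))
        (by rw [count_head_run x xs hnot]; push_cast; ring)
        (List.count_eq_zero.mpr hnot)
        (fun s hs => count_other_run x s hs xs)]
      congr 1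
      have hpos : (0 : Int) < (xs.takeWhile (fun y => y == x)).length + 1 := by positivity
      simp only [hpos, true_and]

-- ===== VERDICT (by name: the statement is the Claim_ definition above) =====
theorem solution_spec : Claim_equal_solution := by
  intro k matrix _ _
  unfold Spec_solution solution_alt
  set cells := (PySem.List.pyRange 0 4 1).flatMap (fun i =>
    (PySem.List.pyRange 0 4 1).map (fun j =>
      PySem.List.pyGetD (PySem.List.pyGetD matrix i []) j "")) with hcells
  rw [solution_eq_digitSum, ← hcells]
  rw [runScan_eq_digitSum_aux k _ _ (le_refl _)
    (by simpa using PySem.List.sorted_pairwise cells (fun x => x))]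
  exact digitSum_congr k pvDigits cells _
    (fun s _ => ((PySem.List.sorted_perm cells (fun x => x) false).count_eq s).symm)
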